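-- pv_equiv track=rewrite | github.com/andures/qAeroChart | qAeroChart/scripts/table_oca_h.py | _classify_rows
-- ===== SOURCE A (Python) =====
-- def _classify_rows(table_rows: list[list[str]]) -> list[str]:
--     """Classify each row as 'title', 'header', 'data', or 'footer'."""
--     header_idx = None
--     for i, row in enumerate(table_rows):
--         if len(row) > 1 and any(row[j] for j in range(1, len(row))):
--             header_idx = i
--             break
--     types: list[str] = []
--     for i, row in enumerate(table_rows):
--         is_span = len(row) > 1 and all(c == "" for c in row[1:])
--         if is_span:
--             types.append("footer" if header_idx is not None and i > header_idx else "title")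
--         elif i == header_idx:
--             types.append("header")
--         else:
--             types.append("data")
--     return types
-- ===== SOURCE B (Python) =====
-- def _classify_rows(table_rows: list[list[str]]) -> list[str]:
--     """Classify each row as 'title', 'header', 'data', or 'footer' in one pass."""
--     types: list[str] = []
--     header_found = False
--     for row in table_rows:
--         if len(row) > 1 and all(c == "" for c in row[1:]):
--             types.append("footer" if header_found else "title")
--         elif not header_found and len(row) > 1 and any(row[j] for j in range(1, len(row))):
--             types.append("header")
--             header_found = True
--         else:
--             types.append("data")
--     return types
-- ===== Notes on version B (the rewrite author's own statement) =====
-- stated objective: simpler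
-- what changed: Replaces A's two passes (a search for the header index, then a classification loop comparing indices against it) with a single pass carrying a header_found boolean, eliminating indices entirely.
import Mathlib
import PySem

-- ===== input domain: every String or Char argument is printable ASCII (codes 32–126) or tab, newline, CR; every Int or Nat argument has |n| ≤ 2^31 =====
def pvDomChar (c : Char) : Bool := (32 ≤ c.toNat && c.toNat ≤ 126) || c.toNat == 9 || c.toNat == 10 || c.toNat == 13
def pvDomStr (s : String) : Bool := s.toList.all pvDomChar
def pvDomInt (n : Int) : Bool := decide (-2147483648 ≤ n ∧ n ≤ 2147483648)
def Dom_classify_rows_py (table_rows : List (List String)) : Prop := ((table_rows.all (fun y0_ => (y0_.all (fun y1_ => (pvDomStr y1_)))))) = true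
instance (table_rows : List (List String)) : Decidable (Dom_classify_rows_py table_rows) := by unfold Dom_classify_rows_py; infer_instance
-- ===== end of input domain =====

-- B collapses A's two passes (find header index, then classify by index) into one pass
-- carrying a header_found boolean; objective: simpler (no indices at all).


-- ===== PORT A =====
-- first loop: find the index of the first row with len > 1 and a non-empty cell after index 0
-- (truthiness of a Python str = non-empty; row[j] for j in range(1,len(row)) enumerates row.drop 1, exact)
def pvAFindHeader : List (List String) → Int → Option Int
  | [], _ => none
  | row :: rest, i =>
    if row.length > 1 ∧ (row.drop 1).any (fun c => c ≠ "") then some i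
    else pvAFindHeader rest (i + 1)

-- second loop: classify each row against header_idx (row[1:] = row.drop 1, exact)
def pvAClassify (headerIdx : Option Int) : List (List String) → Int → List String
  | [], _ => []
  | row :: rest, i =>
    (if row.length > 1 ∧ (row.drop 1).all (fun c => c = "") then
      (match headerIdx with
       | some h => if i > h then "footer" else "title"
       | none => "title")
     else if headerIdx = some i then "header"
     else "data") :: pvAClassify headerIdx rest (i + 1)

def classify_rows_py (table_rows : List (List String)) : List String :=
  pvAClassify (pvAFindHeader table_rows 0) table_rows 0

-- ===== PORT B =====
-- one pass with a header_found boolean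
def pvBLoop : Bool → List (List String) → List String
  | _, [] => []
  | found, row :: rest =>
    if row.length > 1 ∧ (row.drop 1).all (fun c => c = "") then
      (if found then "footer" else "title") :: pvBLoop found rest
    else if found = false ∧ row.length > 1 ∧ (row.drop 1).any (fun c => c ≠ "") then
      "header" :: pvBLoop true rest
    else
      "data" :: pvBLoop found rest

def classify_rows_py_alt (table_rows : List (List String)) : List String :=
  pvBLoop false table_rows

-- ===== PRECONDITION & SPEC =====
def Spec_classify_rows_py (table_rows : List (List String)) (out : List String) : Prop := out = classify_rows_py_alt table_rows
instance (table_rows : List (List String)) (out : List String) : Decidable (Spec_classify_rows_py table_rows out) := by unfold Spec_classify_rows_py; infer_instance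

-- ===== CLAIM (what is proved, stated in full; the proofs are below) =====
def Claim_equal_classify_rows_py : Prop := ∀ (table_rows : List (List String)), Dom_classify_rows_py table_rows → Spec_classify_rows_py table_rows (classify_rows_py table_rows)

-- ===== LEMMAS AND PROOFS =====

-- a found header index is ≥ the starting counter
theorem pvAFindHeader_ge (rows : List (List String)) (i h : Int)
    (hf : pvAFindHeader rows i = some h) : i ≤ h := by
  induction rows generalizing i with
  | nil => simp [pvAFindHeader] at hf
  | cons row rest ih =>
    simp only [pvAFindHeader] at hf
    split at hf
    · simp at hf; omega
    · have := ih (i + 1) hf; omega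

-- after the header has been passed, A emits footer/data exactly like B with found = true
theorem pvA_after (rows : List (List String)) (i h : Int) (hlt : h < i) :
    pvAClassify (some h) rows i = pvBLoop true rows := by
  induction rows generalizing i with
  | nil => rfl
  | cons row rest ih =>
    simp only [pvAClassify, pvBLoop]
    by_cases hs : row.length > 1 ∧ ((row.drop 1).all (fun c => c = "")) = true
    · rw [if_pos hs, if_pos hs, if_pos (show i > h from hlt), if_pos trivial,
        ih (i + 1) (by omega)]
    · rw [if_neg hs, if_neg hs,
        if_neg (show ¬ ((some h : Option Int) = some i) by simp; omega),
        if_neg (show ¬ ((true : Bool) = false ∧ row.length > 1 ∧ ((row.drop 1).any (fun c => c ≠ "")) = true) by simp),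
        ih (i + 1) (by omega)]

-- if no header exists, A emits title/data exactly like B with found = false forever
theorem pvA_none (rows : List (List String)) (i : Int)
    (hf : pvAFindHeader rows i = none) :
    pvAClassify none rows i = pvBLoop false rows := by
  induction rows generalizing i with
  | nil => rfl
  | cons row rest ih =>
    simp only [pvAFindHeader] at hf
    split at hf
    · exact absurd hf (by simp)
    · rename_i hc
      simp only [pvAClassify, pvBLoop]
      by_cases hs : row.length > 1 ∧ ((row.drop 1).all (fun c => c = "")) = true
      · rw [if_pos hs, if_pos hs, if_neg (show ¬ ((false : Bool) = true) by simp), ih (i + 1) hf]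
      · rw [if_neg hs, if_neg hs,
          if_neg (show ¬ ((none : Option Int) = some i) by simp),
          if_neg (show ¬ (True ∧ row.length > 1 ∧ ((row.drop 1).any (fun c => c ≠ "")) = true) from fun h => hc h.2),
          ih (i + 1) hf]

-- the header condition and the span condition are mutually exclusive
theorem pvCond_not_span (row : List String)
    (hc : row.length > 1 ∧ ((row.drop 1).any (fun c => c ≠ "")) = true) :
    ¬ (row.length > 1 ∧ ((row.drop 1).all (fun c => c = "")) = true) := by
  rintro ⟨-, hall⟩
  obtain ⟨c, hmem, hne⟩ := List.any_eq_true.mp hc.2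
  have := List.all_eq_true.mp hall c hmem
  simp at hne this
  exact hne this

-- main invariant: classifying with the header index found from counter i equals B's loop with found = false
theorem pvMain (rows : List (List String)) (i : Int) :
    pvAClassify (pvAFindHeader rows i) rows i = pvBLoop false rows := by
  induction rows generalizing i with
  | nil => rfl
  | cons row rest ih =>
    by_cases hc : row.length > 1 ∧ ((row.drop 1).any (fun c => c ≠ "")) = true
    · have hfind : pvAFindHeader (row :: rest) i = some i := by
        simp only [pvAFindHeader]; rw [if_pos hc]
      have hns := pvCond_not_span row hc
      rw [hfind]
      simp only [pvAClassify, pvBLoop]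
      rw [if_neg hns, if_neg hns, if_pos trivial,
        if_pos (show True ∧ row.length > 1 ∧ ((row.drop 1).any (fun c => c ≠ "")) = true from ⟨trivial, hc⟩),
        pvA_after rest (i + 1) i (by omega)]
    · have hfind : pvAFindHeader (row :: rest) i = pvAFindHeader rest (i + 1) := by
        simp only [pvAFindHeader]; rw [if_neg hc]
      rw [hfind]
      have hbc : ¬ (True ∧ row.length > 1 ∧ ((row.drop 1).any (fun c => c ≠ "")) = true) :=
        fun h => hc h.2
      cases hrec : pvAFindHeader rest (i + 1) with
      | none =>
        simp only [pvAClassify, pvBLoop]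
        by_cases hs : row.length > 1 ∧ ((row.drop 1).all (fun c => c = "")) = true
        · rw [if_pos hs, if_pos hs, if_neg (show ¬ ((false : Bool) = true) by simp), pvA_none rest (i + 1) hrec]
        · rw [if_neg hs, if_neg hs,
            if_neg (show ¬ ((none : Option Int) = some i) by simp),
            if_neg hbc, pvA_none rest (i + 1) hrec]
      | some h =>
        have hge : i + 1 ≤ h := pvAFindHeader_ge rest (i + 1) h hrec
        have hrw : pvAClassify (some h) rest (i + 1) = pvBLoop false rest := by
          have := ih (i + 1); rwa [hrec] at this
        simp only [pvAClassify, pvBLoop]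
        by_cases hs : row.length > 1 ∧ ((row.drop 1).all (fun c => c = "")) = true
        · rw [if_pos hs, if_pos hs, if_neg (show ¬ (i > h) by omega), if_neg (show ¬ ((false : Bool) = true) by simp), hrw]
        · rw [if_neg hs, if_neg hs,
            if_neg (show ¬ ((some h : Option Int) = some i) by simp; omega),
            if_neg hbc, hrw]

-- ===== VERDICT (by name: the statement is the Claim_ definition above) =====
theorem classify_rows_py_spec : Claim_equal_classify_rows_py := by
  intro rows _
  unfold Spec_classify_rows_py classify_rows_py classify_rows_py_alt
  exact pvMain rows 0
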